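-- pv_equiv track=rewrite | github.com/firdavsxon/my_leetcode_solutions-Python | medium/Minimum Window Sort.py | find_right_idx
-- ===== SOURCE A (Python) =====
-- def find_right_idx(arr):
-- 	left = 0
-- 	right = len(arr) - 1
-- 	right_end = 0
-- 	while left < right:
-- 		if arr[right] < arr[right - 1]:
-- 			right_end = right
-- 			break
-- 		right -= 1
-- 	return right_end
-- ===== SOURCE B (Python) =====
-- def find_right_idx(arr):
--     right_end = 0
--     for i in range(1, len(arr)):
--         if arr[i] < arr[i - 1]:
--             right_end = i
--     return right_end
-- ===== Notes on version B (the rewrite author's own statement) =====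
-- stated objective: simpler
-- what changed: Replaces A's backward while-loop with manual index bookkeeping and an early break by a single forward for-loop that overwrites right_end at every descending adjacent pair, returning the last (rightmost) one.
import Mathlib
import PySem

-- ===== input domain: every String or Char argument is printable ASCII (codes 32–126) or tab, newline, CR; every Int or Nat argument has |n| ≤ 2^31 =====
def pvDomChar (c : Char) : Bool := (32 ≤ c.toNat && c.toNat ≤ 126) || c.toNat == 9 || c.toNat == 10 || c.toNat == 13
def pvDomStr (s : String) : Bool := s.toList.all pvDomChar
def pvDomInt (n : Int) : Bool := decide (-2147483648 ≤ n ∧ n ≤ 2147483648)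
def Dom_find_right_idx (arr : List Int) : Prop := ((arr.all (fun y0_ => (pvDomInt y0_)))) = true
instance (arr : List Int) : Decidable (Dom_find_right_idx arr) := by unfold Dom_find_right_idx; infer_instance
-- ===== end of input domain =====

-- B: forward single pass keeping the last descending-pair index, instead of A's backward scan with early break. Same O(n) cost.
-- ===== PORT A =====
-- while-loop on 'right' (left stays 0); Python starts right = len-1 (-1 when empty, loop skipped);
-- the Nat clamp len-1 = 0 for the empty list gives the same skipped loop. Indices are always in range, pyGetD is exact.
def pvLoopA (arr : List Int) : Nat → Int
  | 0 => 0
  | r + 1 =>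
    if PySem.List.pyGetD arr ((r : Int) + 1) 0 < PySem.List.pyGetD arr (r : Int) 0 then
      ((r : Int) + 1)
    else
      pvLoopA arr r

def find_right_idx (arr : List Int) : Int := pvLoopA arr (arr.length - 1)

-- ===== PORT B =====
def find_right_idx_alt (arr : List Int) : Int :=
  (PySem.List.pyRange 1 (arr.length : Int) 1).foldl
    (fun right_end i =>
      if PySem.List.pyGetD arr i 0 < PySem.List.pyGetD arr (i - 1) 0 then i else right_end)
    0

-- ===== PRECONDITION & SPEC =====
def Spec_find_right_idx (arr : List Int) (out : Int) : Prop := out = find_right_idx_alt arr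
instance (arr : List Int) (out : Int) : Decidable (Spec_find_right_idx arr out) := by unfold Spec_find_right_idx; infer_instance

-- ===== CLAIM (what is proved, stated in full; the proofs are below) =====
def Claim_equal_find_right_idx : Prop := ∀ (arr : List Int), Dom_find_right_idx arr → Spec_find_right_idx arr (find_right_idx arr)

-- ===== LEMMAS AND PROOFS =====

-- ===== VERDICT (by name: the statement is the Claim_ definition above) =====
lemma pvLoopA_eq_fold (arr : List Int) (r : Nat) :
    pvLoopA arr r =
      (PySem.List.pyRange 1 ((r : Int) + 1) 1).foldl
        (fun right_end i =>
          if PySem.List.pyGetD arr i 0 < PySem.List.pyGetD arr (i - 1) 0 then i else right_end)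
        0 := by
  induction r with
  | zero => simp [pvLoopA, PySem.List.pyRange_one_eq_nil]
  | succ r ih =>
      have h1 : (1 : Int) ≤ (r : Int) + 1 := by omega
      have hsnoc := PySem.List.pyRange_one_succ_right (a := 1) (b := (r : Int) + 1) h1
      have hc : ((r + 1 : Nat) : Int) + 1 = ((r : Int) + 1) + 1 := by push_cast; ring
      rw [pvLoopA, hc, hsnoc, List.foldl_append, ← ih]
      simp

theorem find_right_idx_spec : Claim_equal_find_right_idx := by
  intro arr _
  unfold Spec_find_right_idx find_right_idx find_right_idx_alt
  rw [pvLoopA_eq_fold]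
  rcases arr with _ | ⟨x, t⟩
  · simp
  · congr 1
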